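-- pv_equiv track=rewrite | github.com/dawidpawliczek4/UWr | wstep-do-informatyki/lista 4/zad4??.py | znajdz_p_i_dzielniki
-- ===== SOURCE A (Python) =====
-- def znajdz_p_i_dzielniki(n, a_list):
--     # Słownik, który przechowa pary (podstawa, wykładnik)
--     factors = {}
--
--     # Znajdź p i dzielniki n
--     for a in a_list:
--         p = 0
--         # Dopóki n jest podzielne przez a, dziel n przez a i zwiększ p
--         while n % a == 0:
--             n //= a
--             p += 1
--         if p > 0:
--             factors[a] = p
--
--     # Znajdź największe p
--     p_max = max(factors.values(), default=0)
--
--     # Znajdź liczby a_i, których p-ta potęga jest dzielnikiem n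
--     dzielniki = [a for a, p in factors.items() if p == p_max]
--
--     return p_max, dzielniki
-- ===== SOURCE B (Python) =====
-- def znajdz_p_i_dzielniki(n, a_list):
--     # One online pass: fuse exponent counting, max finding and tie collection.
--     p_max = 0
--     dzielniki = []
--     for a in a_list:
--         p = 0
--         while n % a == 0:
--             n //= a
--             p += 1
--         if p > p_max:
--             p_max = p
--             dzielniki = [a]
--         elif p == p_max and p > 0:
--             dzielniki.append(a)
--     return p_max, dzielniki
-- ===== Notes on version B (the rewrite author's own statement) =====
-- stated objective: simpler
-- what changed: B drops the factors dict entirely: one online pass keeps a running maximal exponent and its tie list, instead of building a dict and then scanning it twice (max over values, then a filter over items).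
-- outside the precondition, e.g. on znajdz_p_i_dzielniki(12, [0]): A raises ZeroDivisionError, B raises ZeroDivisionError
import Mathlib
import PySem

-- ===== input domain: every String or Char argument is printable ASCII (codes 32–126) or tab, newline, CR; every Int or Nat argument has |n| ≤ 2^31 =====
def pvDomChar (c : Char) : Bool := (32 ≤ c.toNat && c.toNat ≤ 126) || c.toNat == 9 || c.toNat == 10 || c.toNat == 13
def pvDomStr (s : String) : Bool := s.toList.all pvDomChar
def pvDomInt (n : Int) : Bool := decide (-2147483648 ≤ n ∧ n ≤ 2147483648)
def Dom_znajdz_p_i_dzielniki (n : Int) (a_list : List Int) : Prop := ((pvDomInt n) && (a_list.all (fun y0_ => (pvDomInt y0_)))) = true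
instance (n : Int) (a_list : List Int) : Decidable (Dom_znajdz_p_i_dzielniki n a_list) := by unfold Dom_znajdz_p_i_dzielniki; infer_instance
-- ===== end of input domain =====

-- B drops A's factors dict: one online pass keeps the running maximal exponent and its
-- tie list, instead of building a dict and then scanning it twice (max, then filter).

-- ===== PORT A =====
-- the inner 'while n % a == 0: n //= a; p += 1' loop, shared verbatim by both Pythons;
-- fuel |n| suffices whenever n ≠ 0 and |a| ≥ 2 (see strip_main below)
def stripPow : Nat → Int → Int → Int → Int × Int
  | 0, n, _, p => (n, p)
  | fuel+1, n, a, p =>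
    if PySem.Int.mod n a = 0 then stripPow fuel (PySem.Int.floordiv n a) a (p+1) else (n, p)

-- A's loop body: strip a from n, record the exponent in the dict when positive
def stepA (st : Int × PySem.Dict Int Int) (a : Int) : Int × PySem.Dict Int Int :=
  let r := stripPow st.1.natAbs st.1 a 0
  if 0 < r.2 then (r.1, st.2.insert a r.2) else (r.1, st.2)

def znajdz_p_i_dzielniki (n : Int) (a_list : List Int) : Int × List Int :=
  let st := a_list.foldl stepA (n, PySem.Dict.empty)
  let p_max := PySem.List.maxD st.2.values (fun v => v) 0
  (p_max, (st.2.items.filter (fun ap => ap.2 == p_max)).map (fun ap => ap.1))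

-- ===== PORT B =====
-- B's loop body: strip a from n, update the running (p_max, dzielniki) online
def stepB (st : Int × Int × List Int) (a : Int) : Int × Int × List Int :=
  let r := stripPow st.1.natAbs st.1 a 0
  if st.2.1 < r.2 then (r.1, r.2, [a])
  else if r.2 = st.2.1 ∧ 0 < r.2 then (r.1, st.2.1, st.2.2 ++ [a])
  else (r.1, st.2.1, st.2.2)

def znajdz_p_i_dzielniki_alt (n : Int) (a_list : List Int) : Int × List Int :=
  (a_list.foldl stepB (n, 0, [])).2

-- ===== PRECONDITION & SPEC =====
-- Pre_ excludes exactly the inputs where Python A does not return: a = 0 in the list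
-- raises ZeroDivisionError, a = ±1 or (n = 0 with a nonempty list) makes the while
-- loop run forever.
def Pre_znajdz_p_i_dzielniki (n : Int) (a_list : List Int) : Prop :=
  (n ≠ 0 ∨ a_list = []) ∧ ∀ a ∈ a_list, 2 ≤ a.natAbs
instance (n : Int) (a_list : List Int) : Decidable (Pre_znajdz_p_i_dzielniki n a_list) := by
  unfold Pre_znajdz_p_i_dzielniki; infer_instance

def pvWitness_znajdz_p_i_dzielniki : Int × List Int := (360, [2, 3, 5, 7])

def Spec_znajdz_p_i_dzielniki (n : Int) (a_list : List Int) (out : Int × List Int) : Prop := out = znajdz_p_i_dzielniki_alt n a_list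
instance (n : Int) (a_list : List Int) (out : Int × List Int) : Decidable (Spec_znajdz_p_i_dzielniki n a_list out) := by unfold Spec_znajdz_p_i_dzielniki; infer_instance

-- ===== CLAIM (what is proved, stated in full; the proofs are below) =====
def Claim_equal_znajdz_p_i_dzielniki : Prop := ∀ (n : Int) (a_list : List Int), Dom_znajdz_p_i_dzielniki n a_list → Pre_znajdz_p_i_dzielniki n a_list → Spec_znajdz_p_i_dzielniki n a_list (znajdz_p_i_dzielniki n a_list)

-- ===== LEMMAS AND PROOFS =====

lemma strip_main : ∀ (fuel : Nat) (n a p : Int), n ≠ 0 → 2 ≤ a.natAbs → n.natAbs ≤ fuel →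
    ∃ n' q, stripPow fuel n a p = (n', p + q) ∧ n' ∣ n ∧ n' ≠ 0 ∧
      PySem.Int.mod n' a ≠ 0 ∧ 0 ≤ q ∧ (0 < q ↔ PySem.Int.mod n a = 0) := by
  intro fuel
  induction fuel with
  | zero =>
    intro n a p hn h2 hf
    exact absurd (Int.natAbs_eq_zero.1 (Nat.le_zero.1 hf)) hn
  | succ fuel IH =>
    intro n a p hn h2 hf
    by_cases hm : PySem.Int.mod n a = 0
    · have hqa : PySem.Int.floordiv n a * a = n := by
        have := PySem.Int.floordiv_mul_add_mod n a
        omega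
      set q0 := PySem.Int.floordiv n a with hq0def
      have hq0 : q0 ≠ 0 := by
        intro h; apply hn; rw [← hqa, h, zero_mul]
      have habs : q0.natAbs * a.natAbs = n.natAbs := by
        rw [← Int.natAbs_mul, hqa]
      have h1 : 1 ≤ q0.natAbs := by
        have := Int.natAbs_eq_zero.not.2 hq0; omega
      have hmul : q0.natAbs * 2 ≤ q0.natAbs * a.natAbs := Nat.mul_le_mul_left _ h2
      have hlt : q0.natAbs ≤ fuel := by omega
      obtain ⟨n', q, heq, hdvd, hne, hmod, hq, _⟩ := IH q0 a (p+1) hq0 h2 hlt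
      refine ⟨n', 1 + q, ?_, hdvd.trans ⟨a, hqa.symm⟩, hne, hmod, by omega, ?_⟩
      · simp only [stripPow, hm, if_pos, ← hq0def, heq]
        congr 1; omega
      · simp [hm]; omega
    · exact ⟨n, 0, by simp [stripPow, hm], dvd_refl n, hn, hm, le_refl 0, by simp [hm]⟩

lemma maxD_append_singleton (vs : List Int) (p : Int) (hp : 0 ≤ p) :
    PySem.List.maxD (vs ++ [p]) (fun v => v) 0 = max (PySem.List.maxD vs (fun v => v) 0) p := by
  cases vs with
  | nil => simp [PySem.List.maxD, PySem.List.max?]; omega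
  | cons x t =>
    have h1 := PySem.List.max?_id_cons x (t ++ [p])
    have h2 := PySem.List.max?_id_cons x t
    simp only [PySem.List.maxD, List.cons_append, h1, h2, Option.getD_some, List.foldl_append,
      List.foldl_cons, List.foldl_nil]

lemma le_maxD (vs : List Int) (v : Int) (hv : v ∈ vs) : v ≤ PySem.List.maxD vs (fun v => v) 0 := by
  cases vs with
  | nil => simp at hv
  | cons x t =>
    simp only [PySem.List.maxD, PySem.List.max?_id_cons x t, Option.getD_some]
    rcases List.mem_cons.1 hv with rfl | hv
    · exact (PySem.List.le_foldl_max t v).1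
    · exact (PySem.List.le_foldl_max t x).2 v hv

lemma maxD_nonneg (vs : List Int) (h : ∀ v ∈ vs, 0 < v) : 0 ≤ PySem.List.maxD vs (fun v => v) 0 := by
  cases vs with
  | nil => simp [PySem.List.maxD, PySem.List.max?]
  | cons x t =>
    simp only [PySem.List.maxD, PySem.List.max?_id_cons x t, Option.getD_some]
    have h1 := (PySem.List.le_foldl_max t x).1
    have h2 := h x (by simp)
    omega

-- A's final (p_max, dzielniki) read off a dict state
def pmOf (d : PySem.Dict Int Int) : Int := PySem.List.maxD d.values (fun v => v) 0
def dzOf (d : PySem.Dict Int Int) : List Int :=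
  (d.items.filter (fun ap => ap.2 == pmOf d)).map (fun ap => ap.1)

lemma fold_equiv : ∀ (l : List Int) (n : Int) (d : PySem.Dict Int Int),
    n ≠ 0 → (∀ a ∈ l, 2 ≤ a.natAbs) → d.keys.Nodup → (∀ k ∈ d.keys, ¬ k ∣ n) →
    (∀ v ∈ d.values, 0 < v) →
    (pmOf (l.foldl stepA (n, d)).2, dzOf (l.foldl stepA (n, d)).2)
      = (l.foldl stepB (n, pmOf d, dzOf d)).2 := by
  intro l
  induction l with
  | nil => intro n d _ _ _ _ _; rfl
  | cons a t IH =>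
    intro n d hn hall hnd hk hv
    obtain ⟨n', q, heq, hdvd, hne', hmod, hq0, hiff⟩ :=
      strip_main n.natAbs n a 0 hn (hall a List.mem_cons_self) (le_refl _)
    have hpm0 : 0 ≤ pmOf d := maxD_nonneg d.values hv
    have hkn' : ∀ k ∈ d.keys, ¬ k ∣ n' := fun k hkm hd => hk k hkm (hd.trans hdvd)
    rcases Nat.lt_or_ge 0 q.toNat with hq | hq
    case _ =>
      have hq : 0 < q := by omega
      have hadvd : a ∣ n := (PySem.Int.mod_eq_zero_iff_dvd n a).1 (hiff.mp hq)
      have hanotin : a ∉ d.keys := fun h => hk a h hadvd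
      have hc : d.contains a = false := by
        rw [PySem.Dict.contains_eq_decide_mem_keys]; simp [hanotin]
      have hitems : (d.insert a q).items = d.items ++ [(a, q)] :=
        PySem.Dict.items_insert_of_not_contains d q hc
      have hvalues : (d.insert a q).values = d.values ++ [q] := by
        simp [PySem.Dict.values, hitems]
      have hpm' : pmOf (d.insert a q) = max (pmOf d) q := by
        rw [pmOf, hvalues, maxD_append_singleton _ _ (le_of_lt hq)]; rfl
      have hA : stepA (n, d) a = (n', d.insert a q) := by
        simp [stepA, heq, hq]
      have hB : stepB (n, pmOf d, dzOf d) a = (n', pmOf (d.insert a q), dzOf (d.insert a q)) := by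
        rcases lt_trichotomy (pmOf d) q with hlt | heqq | hgt
        · have hm : pmOf (d.insert a q) = q := by rw [hpm']; exact max_eq_right hlt.le
          have hdz : dzOf (d.insert a q) = [a] := by
            rw [dzOf, hitems, hm, List.filter_append]
            have hnil : d.items.filter (fun ap => ap.2 == q) = [] := by
              rw [List.filter_eq_nil_iff]
              intro ap hap
              have hmem : ap.2 ∈ d.values := by
                rw [PySem.Dict.values]; exact List.mem_map_of_mem hap
              have := le_maxD d.values ap.2 hmem
              simp only [beq_iff_eq]; intro h; rw [h] at this; exact absurd this (not_le.2 hlt)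
            simp [hnil]
          simp [stepB, heq, hlt, hm, hdz]
        · have hm : pmOf (d.insert a q) = pmOf d := by rw [hpm', heqq, max_self]
          have hdz : dzOf (d.insert a q) = dzOf d ++ [a] := by
            rw [dzOf, hitems, hm, List.filter_append, dzOf]
            simp [heqq]
          simp [stepB, heq, hm, hdz, heqq, hq]
        · have hm : pmOf (d.insert a q) = pmOf d := by rw [hpm']; exact max_eq_left hgt.le
          have hdz : dzOf (d.insert a q) = dzOf d := by
            rw [dzOf, hitems, hm, List.filter_append, dzOf]
            simp [Int.ne_of_lt hgt]
          simp [stepB, heq, hm, hdz, not_lt.2 hgt.le, Int.ne_of_lt hgt]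
      rw [List.foldl_cons, List.foldl_cons, hA, hB]
      refine IH n' (d.insert a q) hne' (fun b hb => hall b (List.mem_cons_of_mem a hb))
        (PySem.Dict.nodup_keys_insert d a q hnd) ?_ ?_
      · intro k hkm
        rcases (PySem.Dict.mem_keys_insert d a k q).1 hkm with rfl | hkm'
        · exact fun hd => hmod ((PySem.Int.mod_eq_zero_iff_dvd n' k).2 hd)
        · exact hkn' k hkm'
      · rw [hvalues]
        intro v hv'
        rcases List.mem_append.1 hv' with h | h
        · exact hv v h
        · simp at h; omega
    · -- q = 0 case
      have hq' : q = 0 := by omega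
      subst hq'
      have hA : stepA (n, d) a = (n', d) := by
        simp [stepA, heq]
      have hB : stepB (n, pmOf d, dzOf d) a = (n', pmOf d, dzOf d) := by
        simp [stepB, heq]; omega
      rw [List.foldl_cons, List.foldl_cons, hA, hB]
      exact IH n' d hne' (fun b hb => hall b (List.mem_cons_of_mem a hb)) hnd hkn' hv

-- ===== VERDICT (by name: the statement is the Claim_ definition above) =====
theorem znajdz_p_i_dzielniki_spec : Claim_equal_znajdz_p_i_dzielniki := by
  intro n a_list _ hpre
  unfold Spec_znajdz_p_i_dzielniki
  rcases hpre with ⟨hn, hall⟩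
  rcases hn with hn | rfl
  · have h := fold_equiv a_list n PySem.Dict.empty hn hall (by simp [PySem.Dict.keys, PySem.Dict.empty])
      (by simp [PySem.Dict.keys, PySem.Dict.empty]) (by simp [PySem.Dict.values, PySem.Dict.empty])
    simpa [znajdz_p_i_dzielniki, znajdz_p_i_dzielniki_alt, pmOf, dzOf, PySem.Dict.values,
      PySem.Dict.empty, PySem.List.maxD, PySem.List.max?] using h
  · rfl
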